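-- pv_equiv track=rewrite | github.com/Arsen1302/Code-copy-detector | TestData/solutions/problem_1584_2.py | solution_1584_2
-- ===== SOURCE A (Python) =====
-- from typing import List
--
-- def solution_1584_2(nums: List[int], k: int) -> int:
--     nums.sort()
--     res=1
--     minm=nums[0]
--     maxm=nums[0]
--     for x in nums:
--         if abs(x-minm)>k or abs(x-maxm)>k:
--             res+=1
--             minm=x
--             maxm=x
--         else:
--             minm=min(minm,x)
--             maxm=max(maxm,x)
--     return res
-- ===== SOURCE B (Python) =====
-- from typing import List
-- from bisect import bisect_right
--
-- def solution_1584_2(nums: List[int], k: int) -> int: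
--     # Sorts nums in place like A; jumps group-by-group with binary search
--     # instead of scanning element-by-element.
--     nums.sort()
--     res = 1
--     start = nums[0]
--     i = 0
--     n = len(nums)
--     while True:
--         j = bisect_right(nums, start + k, i)
--         if j >= n:
--             return res
--         res += 1
--         start = nums[j]
--         i = j + 1
-- ===== Notes on version B (the rewrite author's own statement) =====
-- stated objective: faster
-- what changed: After the in-place sort, B iterates over groups instead of elements: one bisect_right per group jumps directly past the current group's end, replacing A's element-by-element scan that maintains running min/max.
import Mathlib
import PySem

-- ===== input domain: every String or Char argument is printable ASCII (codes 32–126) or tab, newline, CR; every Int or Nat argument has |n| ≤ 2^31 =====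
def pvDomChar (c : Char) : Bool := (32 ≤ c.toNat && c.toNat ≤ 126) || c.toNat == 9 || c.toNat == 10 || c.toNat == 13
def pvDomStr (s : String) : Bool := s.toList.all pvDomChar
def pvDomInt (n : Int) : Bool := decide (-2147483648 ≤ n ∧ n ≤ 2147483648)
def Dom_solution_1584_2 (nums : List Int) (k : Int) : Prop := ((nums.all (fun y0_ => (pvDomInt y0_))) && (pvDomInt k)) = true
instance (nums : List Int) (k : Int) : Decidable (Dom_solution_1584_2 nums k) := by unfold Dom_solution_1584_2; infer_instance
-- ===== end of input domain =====

-- B replaces A's element-by-element scan of the sorted list by a group-by-group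
-- jump with bisect_right (objective: alternative algorithm, same O(n log n) cost).
-- Both A and B sort `nums` in place (identical mutation); the equivalence proved
-- here is about the return value.

-- ===== PORT A =====
def solution_1584_2 (nums : List Int) (k : Int) : Int :=
  let s := PySem.List.sorted nums (fun x => x)
  match s with
  | [] => 0  -- nums[0] raises IndexError on the empty list; excluded by Pre_
  | m :: t =>
    ((m :: t).foldl (fun (st : Int × Int × Int) x =>
        if |x - st.2.1| > k ∨ |x - st.2.2| > k then (st.1 + 1, x, x)
        else (st.1, min st.2.1 x, max st.2.2 x)) (1, m, m)).1

-- ===== PORT B =====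
-- bisect.bisect_right(nums, c, i) on the sorted list is ported as
-- i + PySem.List.bisectRight (nums.drop i) c (the lo-argument form of bisect_right).
def altLoop (s : List Int) (k : Int) (res : Int) (start : Int) (i : Nat) : Int :=
  let j := i + PySem.List.bisectRight (s.drop i) (start + k)
  if _h : s.length ≤ j then res
  else altLoop s k (res + 1) (s.getD j 0) (j + 1)
termination_by s.length - i
decreasing_by omega

def solution_1584_2_alt (nums : List Int) (k : Int) : Int :=
  let s := PySem.List.sorted nums (fun x => x)
  match s with
  | [] => 0  -- nums[0] raises IndexError on the empty list; excluded by Pre_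
  | m :: _ => altLoop s k 1 m 0

-- ===== PRECONDITION & SPEC =====
-- Pre_ excludes only the empty list, on which both A and B raise IndexError at nums[0].
def Pre_solution_1584_2 (nums : List Int) (k : Int) : Prop := nums ≠ []
instance (nums : List Int) (k : Int) : Decidable (Pre_solution_1584_2 nums k) := by unfold Pre_solution_1584_2; infer_instance

def pvWitness_solution_1584_2 : List Int × Int := ([3, 6, 1, 2, 5], 2)

def Spec_solution_1584_2 (nums : List Int) (k : Int) (out : Int) : Prop := out = solution_1584_2_alt nums k
instance (nums : List Int) (k : Int) (out : Int) : Decidable (Spec_solution_1584_2 nums k out) := by unfold Spec_solution_1584_2; infer_instance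

-- ===== CLAIM (what is proved, stated in full; the proofs are below) =====
def Claim_equal_solution_1584_2 : Prop := ∀ (nums : List Int) (k : Int), Dom_solution_1584_2 nums k → Pre_solution_1584_2 nums k → Spec_solution_1584_2 nums k (solution_1584_2 nums k)

-- ===== LEMMAS AND PROOFS =====

-- Common reference scan: one pass over the sorted list keeping only the start of
-- the current group.
def scan (k res start : Int) : List Int → Int
  | [] => res
  | x :: xs => if start + k < x then scan k (res + 1) x xs else scan k res start xs

lemma scan_eq_dropWhile (k res start : Int) (l : List Int) :
    scan k res start l =
      (match l.dropWhile (fun y => decide (y ≤ start + k)) with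
       | [] => res
       | x :: xs => scan k (res + 1) x xs) := by
  induction l with
  | nil => rfl
  | cons x xs ih =>
    by_cases h : start + k < x
    · simp [scan, h, List.dropWhile, not_le.mpr h]
    · simp [scan, h, List.dropWhile, not_lt.mp h, ih]

lemma takeWhile_boundary {α : Type} (p : α → Bool) (l : List α)
    (h : (l.takeWhile p).length < l.length) :
    p (l[(l.takeWhile p).length]'h) = false := by
  induction l with
  | nil => simp at h
  | cons a t ih =>
    by_cases hp : p a
    · simpa [List.takeWhile, hp] using ih (by simpa [List.takeWhile, hp] using h)
    · simpa [List.takeWhile, hp] using hp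

lemma bisect_eq_takeWhile (l : List Int) (c : Int) (hs : l.Pairwise (· ≤ ·)) :
    PySem.List.bisectRight l c = (l.takeWhile (fun y => decide (y ≤ c))).length := by
  obtain ⟨h1, h2, h3⟩ := PySem.List.bisectRight_spec l c hs
  set b := PySem.List.bisectRight l c with hb
  set t := (l.takeWhile (fun y => decide (y ≤ c))).length with ht
  have htle : t ≤ l.length := (List.takeWhile_prefix _).length_le
  rcases lt_trichotomy b t with hlt | he | hgt
  · -- b < t : l[b] ≤ c by takeWhile, c < l[b] by spec
    have hbl : b < l.length := lt_of_lt_of_le hlt htle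
    have hmem : l[b] ≤ c := by
      have := List.mem_takeWhile_imp
        (List.mem_of_getElem (l := l.takeWhile (fun y => decide (y ≤ c))) (i := b)
          (h := by omega) rfl)
      have hg : (l.takeWhile (fun y => decide (y ≤ c)))[b]'(by omega) = l[b] :=
        (List.takeWhile_prefix _).getElem (by omega)
      rw [hg] at this
      simpa using this
    exact absurd (h3 b hbl le_rfl) (not_lt.mpr hmem)
  · exact he
  · -- t < b : l[t] ≤ c by spec, but boundary says not
    have htl : t < l.length := lt_of_lt_of_le hgt h1
    have hbnd := takeWhile_boundary (fun y => decide (y ≤ c)) l htl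
    rw [decide_eq_false_iff_not, not_le] at hbnd
    simp only [← ht] at hbnd
    exact absurd (h2 t htl hgt) (not_le.mpr hbnd)
  -- t = b handled above

lemma dropWhile_eq_drop_takeWhile {α : Type} (p : α → Bool) (l : List α) :
    l.dropWhile p = l.drop (l.takeWhile p).length := by
  have h : List.drop (l.takeWhile p).length (l.takeWhile p ++ l.dropWhile p)
      = l.dropWhile p := List.drop_left
  rw [List.takeWhile_append_dropWhile] at h
  exact h.symm

lemma altLoop_eq_scan (s : List Int) (k : Int) (hs : s.Pairwise (· ≤ ·)) :
    ∀ (N : Nat) (res start : Int) (i : Nat), s.length - i ≤ N →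
      altLoop s k res start i = scan k res start (s.drop i) := by
  intro N
  induction N with
  | zero =>
    intro res start i hN
    have hlen : s.length ≤ i := by omega
    have hd : s.drop i = [] := List.drop_eq_nil_of_le hlen
    rw [altLoop]
    simp [hd, PySem.List.bisectRight, scan]
    omega
  | succ N ih =>
    intro res start i hN
    set l := s.drop i with hl
    have hpl : l.Pairwise (· ≤ ·) := hs.drop
    have hbt := bisect_eq_takeWhile l (start + k) hpl
    set p : Int → Bool := fun y => decide (y ≤ start + k) with hp
    set b := (l.takeWhile p).length with hbdef
    have hble : b ≤ l.length := (List.takeWhile_prefix _).length_le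
    have hll : l.length = s.length - i := List.length_drop
    have hdw : l.dropWhile p = l.drop b := dropWhile_eq_drop_takeWhile p l
    rw [altLoop]
    simp only [← hl, hbt]
    by_cases hc : s.length ≤ i + b
    · -- finished: the rest of the list is one group
      have hbe : b = l.length := by omega
      have hnil : l.dropWhile p = [] := by
        rw [hdw, hbe]; exact List.drop_length
      rw [dif_pos hc, scan_eq_dropWhile, ← hp, hnil]
    · rw [dif_neg hc]
      have hblt : b < l.length := by omega
      -- the element at the jump target
      have hget : s.getD (i + b) 0 = l[b]'hblt := by
        rw [List.getD_eq_getElem?_getD]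
        have : s[i + b]? = l[b]? := by rw [hl, List.getElem?_drop]
        rw [this, List.getElem?_eq_getElem hblt]
        rfl
      have hdrop : s.drop (i + b + 1) = l.drop (b + 1) := by
        rw [hl, List.drop_drop]
        congr 1
      have hcons : l.drop b = l[b]'hblt :: l.drop (b + 1) :=
        (List.getElem_cons_drop hblt).symm
      rw [ih (res + 1) (s.getD (i + b) 0) (i + b + 1) (by omega)]
      rw [scan_eq_dropWhile k res start l, ← hp, hdw, hcons, hget, hdrop]

lemma abs_cond (k minm maxm x : Int) (h1 : minm ≤ maxm) (h2 : maxm ≤ x) :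
    (|x - minm| > k ∨ |x - maxm| > k) ↔ minm + k < x := by
  rw [abs_of_nonneg (by omega : (0:Int) ≤ x - minm),
      abs_of_nonneg (by omega : (0:Int) ≤ x - maxm)]
  omega

lemma foldA_eq_scan (k : Int) :
    ∀ (l : List Int) (res minm maxm : Int), minm ≤ maxm → (∀ y ∈ l, maxm ≤ y) →
      l.Pairwise (· ≤ ·) →
      ((l.foldl (fun (st : Int × Int × Int) x =>
          if |x - st.2.1| > k ∨ |x - st.2.2| > k then (st.1 + 1, x, x)
          else (st.1, min st.2.1 x, max st.2.2 x)) (res, minm, maxm)).1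
        = scan k res minm l) := by
  intro l
  induction l with
  | nil => intro res minm maxm _ _ _; rfl
  | cons x xs ih =>
    intro res minm maxm hmm hub hpw
    have hx : maxm ≤ x := hub x (by simp)
    have hcond := abs_cond k minm maxm x hmm hx
    by_cases hc : minm + k < x
    · have : |x - minm| > k ∨ |x - maxm| > k := hcond.mpr hc
      simp only [List.foldl_cons, if_pos this, scan, if_pos hc]
      exact ih (res + 1) x x le_rfl (fun y hy => List.rel_of_pairwise_cons hpw hy)
        hpw.of_cons
    · have : ¬(|x - minm| > k ∨ |x - maxm| > k) := fun h => hc (hcond.mp h)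
      simp only [List.foldl_cons, if_neg this, scan, if_neg hc]
      rw [min_eq_left (by omega : minm ≤ x), max_eq_right hx]
      exact ih res minm x (by omega) (fun y hy => List.rel_of_pairwise_cons hpw hy)
        hpw.of_cons

-- ===== VERDICT (by name: the statement is the Claim_ definition above) =====
theorem solution_1584_2_spec : Claim_equal_solution_1584_2 := by
  intro nums k _hdom hpre
  unfold Spec_solution_1584_2 solution_1584_2 solution_1584_2_alt
  cases hse : PySem.List.sorted nums (fun x => x) with
  | nil => exact absurd ((PySem.List.sorted_eq_nil_iff nums _ false).mp hse) hpre
  | cons m t =>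
    simp only
    have hpw : (m :: t).Pairwise (fun a b : Int => a ≤ b) := by
      have := PySem.List.sorted_pairwise nums (fun x : Int => x)
      rwa [hse] at this
    have hub : ∀ y ∈ (m :: t), m ≤ y := by
      intro y hy
      rcases List.mem_cons.mp hy with h | h
      · simp [h]
      · exact List.rel_of_pairwise_cons hpw h
    rw [foldA_eq_scan k (m :: t) 1 m m le_rfl hub hpw]
    have := altLoop_eq_scan (m :: t) k hpw (m :: t).length 1 m 0 (by omega)
    rw [this, List.drop_zero]
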